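-- pv_equiv track=rewrite | github.com/pl464/euph-starsem-2023 | multilingual/utils.py | get_single_sentence_context
-- ===== SOURCE A (Python) =====
-- def get_euph_pos(text, euph):
--     # split_text = list(map(lambda x: x.lower(), split_text)) # need to ignore case for now
--     # for each word in the text
--     for x in range(0, len(text)-1):
--         # check if the word is the first word of the euph
--         if (text[x] == euph[0]):
--             # if it is, need to make sure it's the whole euph (e.g., in "armed conflict", need to make sure we didn't just find "armed soldier")
--             if (text[x:x+len(euph)] == euph):
--                 # in this case, return their position
--                 return x, x+(len(euph)-1)
--     # otherwise, the euph wasn't found in the text (should not happen)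
--     return -1, -1
--
-- def get_single_sentence_context(text, euph):
--     # this is to handle euphemisms with hyphens
--     if '-' in euph:
--         euph = euph.replace('-', ' - ')
--
--     # begin by tokenizing the text and euphemism by whitespace
--     tokenized = text.split()
--     tok_euph = euph.split()
--
--     # we need the position of the euphemism so we can look backwards/forwards from it
--     pos1, pos2 = get_euph_pos(tokenized, tok_euph)
--
--     # the below ideally shouldn't happen
--     # but this allows program to keep running if it does
--     if (pos1 == -1 and pos2 == -1):
--         return "" # we can tell this happened if there is a blank edited_text
--
--     # these variables will indicate where the cropped context begins/ends
--     context_begin = 0 # assume the first word of the text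
--     context_end = len(tokenized)-1 # assume the last word of the text
--
--     # find context_begin
--     saw_first_sent_tag = False # have we seen one sentence tag yet?
--     while (pos1 > 0):
--         if (tokenized[pos1-1] == '<s>'):
--             #if (saw_first_sent_tag):
--             context_begin = pos1
--             break
--         pos1 -= 1
--
--     # find context_end
--     saw_first_sent_tag = False
--     while (pos2 < len(tokenized)-1):
--         if (tokenized[pos2+1] == '<s>'):
--             context_end = pos2
--             break
--         pos2 += 1
--
--     # put together the cropped text
--     cropped_context = ""
--     for token in tokenized[context_begin:context_end+1]:
--         cropped_context += token + ' '
--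
--     return cropped_context
-- ===== SOURCE B (Python) =====
-- def get_single_sentence_context(text, euph):
--     # this is to handle euphemisms with hyphens
--     if '-' in euph:
--         euph = euph.replace('-', ' - ')
--
--     tokenized = text.split()
--     tok_euph = euph.split()
--     n = len(tokenized)
--     k = len(tok_euph)
--
--     # an empty euphemism is never found
--     if k == 0:
--         return ""
--
--     # first match position, skipping the last token (mirrors the original search range)
--     pos1 = None
--     for x in range(n - 1):
--         if tokenized[x:x + k] == tok_euph:
--             pos1 = x
--             break
--     if pos1 is None:
--         return ""
--     pos2 = pos1 + k - 1
--
--     # one pass over the tokens collecting all sentence-tag positions,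
--     # then pick the boundaries around the match arithmetically
--     tags = [i for i in range(n) if tokenized[i] == '<s>']
--     before = [i for i in tags if i < pos1]
--     after = [i for i in tags if i > pos2]
--     begin = before[-1] + 1 if before else 0
--     end = after[0] - 1 if after else n - 1
--
--     return ' '.join(tokenized[begin:end + 1]) + ' '
-- ===== Notes on version B (the rewrite author's own statement) =====
-- stated objective: alternative
-- what changed: A finds the context bounds by two outward while-scans from the match (backward for the tag before, forward for the tag after) and builds the output by token-by-token string concatenation; B makes one forward pass collecting all '<s>' positions, picks the boundaries by filtering that list (last tag before the match / first tag after it), and emits the slice with a single ' '.join.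
import Mathlib
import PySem

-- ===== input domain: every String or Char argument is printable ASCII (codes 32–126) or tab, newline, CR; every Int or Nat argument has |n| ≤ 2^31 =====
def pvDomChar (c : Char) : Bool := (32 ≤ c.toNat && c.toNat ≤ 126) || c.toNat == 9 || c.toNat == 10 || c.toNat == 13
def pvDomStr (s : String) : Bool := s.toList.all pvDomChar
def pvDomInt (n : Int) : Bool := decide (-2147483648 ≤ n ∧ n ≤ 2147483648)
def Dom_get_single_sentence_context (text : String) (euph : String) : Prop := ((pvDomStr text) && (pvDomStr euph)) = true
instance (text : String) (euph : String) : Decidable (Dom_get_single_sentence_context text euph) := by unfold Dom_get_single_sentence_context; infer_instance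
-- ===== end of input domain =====

-- B replaces A's two outward while-scans from the match with one pass collecting all '<s>'
-- positions and picking the boundaries by filtering that list (objective: alternative decomposition).


-- ===== PORT A =====
-- for x in range(0, len(text)-1): the body of get_euph_pos, recursing over the index list.
-- text[x] is always in range here (x < len(text)-1), ported as getD.  euph[0] raises IndexError on
-- an empty euph (excluded by Pre_); here the comparison against euph.head? is then false.
def pvGetEuphPosGo (text : List String) (euph : List String) : List Nat → Int × Int
  | [] => (-1, -1)
  | x :: xs =>
    if some (text.getD x "") == euph.head? then
      if PySem.List.slice text (some (x : Int)) (some ((x : Int) + (euph.length : Int))) == euph then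
        ((x : Int), (x : Int) + ((euph.length : Int) - 1))
      else pvGetEuphPosGo text euph xs
    else pvGetEuphPosGo text euph xs

def pvGetEuphPos (text : List String) (euph : List String) : Int × Int :=
  pvGetEuphPosGo text euph (List.range (text.length - 1))

-- while (pos1 > 0): if tokenized[pos1-1] == '<s>': context_begin = pos1; break; pos1 -= 1
-- (context_begin stays 0 when the loop finishes); tokenized[pos1-1] is in range, ported as getD
def pvFindBegin (toks : List String) : Nat → Nat
  | 0 => 0
  | p + 1 => if toks.getD p "" == "<s>" then p + 1 else pvFindBegin toks p

-- while (pos2 < len(tokenized)-1): if tokenized[pos2+1] == '<s>': context_end = pos2; break; pos2 += 1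
-- (context_end stays n-1 when the loop finishes); fuel ≥ n-1-pos2 (we pass n) makes it structural
def pvFindEnd (toks : List String) (n : Nat) : Nat → Nat → Nat
  | 0, _ => n - 1
  | f + 1, p =>
    if p < n - 1 then
      (if toks.getD (p + 1) "" == "<s>" then p else pvFindEnd toks n f (p + 1))
    else n - 1

def get_single_sentence_context (text : String) (euph : String) : String :=
  let euph := if PySem.Str.isIn "-" euph then PySem.Str.replace euph "-" " - " else euph
  let tokenized := PySem.Str.split₀ text
  let tok_euph := PySem.Str.split₀ euph
  let pp := pvGetEuphPos tokenized tok_euph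
  if pp.1 == -1 && pp.2 == -1 then ""
  else
    -- pp.1, pp.2 ≥ 0 in this branch, so toNat is exact
    let context_begin := pvFindBegin tokenized pp.1.toNat
    let context_end := pvFindEnd tokenized tokenized.length tokenized.length pp.2.toNat
    (PySem.List.slice tokenized (some (context_begin : Int)) (some ((context_end : Int) + 1))).foldl
      (fun acc token => acc ++ token ++ " ") ""

-- ===== PORT B =====
-- first x in range(n-1) whose k-token slice equals the euphemism (None = not found)
def pvFindPos (toks te : List String) : List Nat → Option Nat
  | [] => none
  | x :: xs =>
    if PySem.List.slice toks (some (x : Int)) (some ((x : Int) + (te.length : Int))) == te then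
      some x
    else pvFindPos toks te xs

def get_single_sentence_context_alt (text : String) (euph : String) : String :=
  let euph := if PySem.Str.isIn "-" euph then PySem.Str.replace euph "-" " - " else euph
  let toks := PySem.Str.split₀ text
  let te := PySem.Str.split₀ euph
  let n := toks.length
  if te.length == 0 then ""
  else
    match pvFindPos toks te (List.range (n - 1)) with
    | none => ""
    | some p1 =>
      let p2 := p1 + (te.length - 1)
      let tags := (List.range n).filter (fun i => toks.getD i "" == "<s>")
      let before := tags.filter (fun i => i < p1)
      let after := tags.filter (fun i => p2 < i)
      -- cb, ce are the Python ints before[-1]+1 / after[0]-1 / 0 / n-1; all nonnegative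
      -- (after[0] > p2 ≥ 0), so Nat is exact
      let cb : Nat := match before.getLast? with | some b => b + 1 | none => 0
      let ce : Nat := match after.head? with | some a => a - 1 | none => n - 1
      PySem.Str.join " " (PySem.List.slice toks (some (cb : Int)) (some ((ce : Int) + 1))) ++ " "

-- ===== PRECONDITION & SPEC =====
-- Pre_ excludes exactly the inputs where Python A raises IndexError: the (hyphen-expanded)
-- euphemism tokenizes to no tokens while the text has at least two tokens (euph[0] on []).
def Pre_get_single_sentence_context (text : String) (euph : String) : Prop :=
  PySem.Str.split₀ (if PySem.Str.isIn "-" euph then PySem.Str.replace euph "-" " - " else euph) ≠ []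
    ∨ (PySem.Str.split₀ text).length ≤ 1
instance (text : String) (euph : String) : Decidable (Pre_get_single_sentence_context text euph) := by
  unfold Pre_get_single_sentence_context; infer_instance

def pvWitness_get_single_sentence_context : String × String := ("<s> a b c <s> d", "b c")

def Spec_get_single_sentence_context (text : String) (euph : String) (out : String) : Prop := out = get_single_sentence_context_alt text euph
instance (text : String) (euph : String) (out : String) : Decidable (Spec_get_single_sentence_context text euph out) := by unfold Spec_get_single_sentence_context; infer_instance

-- ===== CLAIM (what is proved, stated in full; the proofs are below) =====
def Claim_equal_get_single_sentence_context : Prop := ∀ (text : String) (euph : String), Dom_get_single_sentence_context text euph → Pre_get_single_sentence_context text euph → Spec_get_single_sentence_context text euph (get_single_sentence_context text euph)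

-- ===== LEMMAS AND PROOFS =====

-- a matching slice forces the first-word check of A's finder to succeed
lemma pv_head_of_slice (toks te : List String) (x : Nat) (hte : te ≠ [])
    (h : PySem.List.slice toks (some (x : Int)) (some ((x : Int) + (te.length : Int))) = te) :
    some (toks.getD x "") = te.head? := by
  rw [PySem.List.slice_natCast_add] at h
  have h1 : ((toks.drop x).take te.length).head? = te.head? := by rw [h]
  rw [List.head?_take, List.head?_drop] at h1
  have hk : te.length ≠ 0 := by simpa using hte
  rw [if_neg hk] at h1
  obtain ⟨e, rest, rfl⟩ := List.exists_cons_of_ne_nil hte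
  have hx : x < toks.length := by
    by_contra hx
    rw [List.getElem?_eq_none (by omega)] at h1
    simp at h1
  rw [List.getD_eq_getElem toks "" hx]
  rw [List.getElem?_eq_getElem hx] at h1
  simpa using h1

-- a matching slice fits inside the token list
lemma pv_bound_of_slice (toks te : List String) (x : Nat) (hte : te ≠ [])
    (h : PySem.List.slice toks (some (x : Int)) (some ((x : Int) + (te.length : Int))) = te) :
    x + te.length ≤ toks.length := by
  rw [PySem.List.slice_natCast_add] at h
  have hl := congrArg List.length h
  rw [List.length_take, List.length_drop] at hl
  have hk : te.length ≠ 0 := by simpa using hte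
  omega

-- A's finder equals B's finder (packaged through the Option result)
lemma pv_pos_eq (toks te : List String) (hte : te ≠ []) (xs : List Nat) :
    pvGetEuphPosGo toks te xs =
      (match pvFindPos toks te xs with
       | none => (-1, -1)
       | some x => ((x : Int), (x : Int) + ((te.length : Int) - 1))) := by
  induction xs with
  | nil => rfl
  | cons x xs ih =>
    by_cases hsl : PySem.List.slice toks (some (x : Int)) (some ((x : Int) + (te.length : Int))) = te
    · have hh := pv_head_of_slice toks te x hte hsl
      rw [List.getD_eq_getElem?_getD] at hh
      simp [pvGetEuphPosGo, pvFindPos, hsl, hh]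
    · by_cases hh : (some (toks.getD x "") == te.head?) = true
      · simp only [pvGetEuphPosGo, pvFindPos, hh, if_true]
        rw [if_neg (by simpa using hsl), if_neg (by simpa using hsl)]
        exact ih
      · simp only [pvGetEuphPosGo, pvFindPos]
        rw [if_neg hh, if_neg (by simpa using hsl)]
        exact ih

lemma pv_pos_sound (toks te : List String) (xs : List Nat) (x : Nat)
    (h : pvFindPos toks te xs = some x) :
    x ∈ xs ∧ PySem.List.slice toks (some (x : Int)) (some ((x : Int) + (te.length : Int))) = te := by
  induction xs with
  | nil => simp [pvFindPos] at h
  | cons y ys ih =>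
    by_cases hsl : PySem.List.slice toks (some (y : Int)) (some ((y : Int) + (te.length : Int))) = te
    · simp [pvFindPos, hsl] at h
      subst h
      exact ⟨List.mem_cons_self, hsl⟩
    · simp [pvFindPos, hsl] at h
      obtain ⟨hm, hs⟩ := ih h
      exact ⟨List.mem_cons_of_mem _ hm, hs⟩

lemma pv_filter_lt (p : Nat) : ∀ n, p ≤ n →
    (List.range n).filter (fun i => decide (i < p)) = List.range p := by
  intro n
  induction n with
  | zero =>
    intro h
    have h0 : p = 0 := Nat.le_zero.mp h
    subst h0
    simp
  | succ n ih =>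
    intro h
    rw [List.range_succ, List.filter_append]
    by_cases hp : p ≤ n
    · rw [ih hp]
      have hn : ¬ (n < p) := by omega
      simp [hn]
    · have hpn : p = n + 1 := by omega
      subst hpn
      have h1 : (List.range n).filter (fun i => decide (i < n + 1)) = List.range n :=
        List.filter_eq_self.mpr
          (by intro a ha; simp only [List.mem_range] at ha; simp only [decide_eq_true_eq]; omega)
      have h2 : List.filter (fun i => decide (i < n + 1)) [n] = [n] := by simp
      rw [h1, h2, ← List.range_succ]

lemma pv_filter_gt (p : Nat) : ∀ n,
    (List.range n).filter (fun i => decide (p < i)) = List.range' (p + 1) (n - (p + 1)) := by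
  intro n
  induction n with
  | zero => simp
  | succ n ih =>
    rw [List.range_succ, List.filter_append, ih]
    by_cases hp : p < n
    · have h1 : n + 1 - (p + 1) = (n - (p + 1)) + 1 := by omega
      rw [h1, List.range'_1_concat]
      have h2 : p + 1 + (n - (p + 1)) = n := by omega
      simp [hp, h2]
    · have h1 : n - (p + 1) = 0 := by omega
      have h2 : n + 1 - (p + 1) = 0 := by omega
      simp [hp, h1, h2]

lemma pv_before_eq (toks : List String) (p n : Nat) (h : p ≤ n) :
    ((List.range n).filter (fun i => toks.getD i "" == "<s>")).filter (fun i => decide (i < p))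
      = (List.range p).filter (fun i => toks.getD i "" == "<s>") := by
  rw [List.filter_filter, ← pv_filter_lt p n h, List.filter_filter]
  exact List.filter_congr (fun a _ => by rw [Bool.and_comm])

lemma pv_after_eq (toks : List String) (p n : Nat) :
    ((List.range n).filter (fun i => toks.getD i "" == "<s>")).filter (fun i => decide (p < i))
      = (List.range' (p + 1) (n - (p + 1))).filter (fun i => toks.getD i "" == "<s>") := by
  rw [List.filter_filter, ← pv_filter_gt p n, List.filter_filter]
  exact List.filter_congr (fun a _ => by rw [Bool.and_comm])

-- A's backward while-loop computes exactly B's last-tag-before formula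
lemma pv_begin_eq (toks : List String) : ∀ p : Nat,
    pvFindBegin toks p =
      (match ((List.range p).filter (fun i => toks.getD i "" == "<s>")).getLast? with
       | some b => b + 1 | none => 0) := by
  intro p
  induction p with
  | zero => rfl
  | succ p ih =>
    rw [List.range_succ, List.filter_append]
    have hL : pvFindBegin toks (p + 1)
        = if (toks.getD p "" == "<s>") = true then p + 1 else pvFindBegin toks p := rfl
    by_cases hc : (toks.getD p "" == "<s>") = true
    · rw [hL, if_pos hc, List.filter_cons_of_pos (p := fun i => toks.getD i "" == "<s>") hc,
        List.filter_nil, List.getLast?_concat]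
    · rw [hL, if_neg hc, List.filter_cons_of_neg (p := fun i => toks.getD i "" == "<s>") hc,
        List.filter_nil, List.append_nil]
      exact ih

-- A's forward while-loop computes exactly B's first-tag-after formula
lemma pv_end_eq (toks : List String) (n : Nat) : ∀ fuel p, p < n → n - 1 - p ≤ fuel →
    pvFindEnd toks n fuel p =
      (match ((List.range' (p + 1) (n - (p + 1))).filter (fun i => toks.getD i "" == "<s>")).head? with
       | some a => a - 1 | none => n - 1) := by
  intro fuel
  induction fuel with
  | zero =>
    intro p hp hf
    have h0 : n - (p + 1) = 0 := by omega
    simp [pvFindEnd, h0]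
  | succ f ih =>
    intro p hp hf
    simp only [pvFindEnd]
    by_cases hlt : p < n - 1
    · rw [if_pos hlt]
      have h1 : n - (p + 1) = (n - (p + 2)) + 1 := by omega
      rw [h1, List.range'_succ]
      by_cases hc : (toks.getD (p + 1) "" == "<s>") = true
      · rw [if_pos hc, List.filter_cons_of_pos (p := fun i => toks.getD i "" == "<s>") hc]
        rfl
      · rw [if_neg hc, List.filter_cons_of_neg (p := fun i => toks.getD i "" == "<s>") hc]
        exact ih (p + 1) (by omega) (by omega)
    · rw [if_neg hlt]
      have h0 : n - (p + 1) = 0 := by omega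
      rw [h0]
      rfl

lemma pv_fold_join_chars : ∀ (L : List (List Char)) (c : List Char), L ≠ [] →
    L.foldl (fun a t => a ++ t ++ [' ']) c = c ++ PySem.Chars.join [' '] L ++ [' '] := by
  intro L
  induction L with
  | nil => intro c h; exact absurd rfl h
  | cons t L ih =>
    intro c _
    cases L with
    | nil => simp [PySem.Chars.join_singleton]
    | cons t' L' =>
      rw [List.foldl_cons, ih (c ++ t ++ [' ']) (by simp), PySem.Chars.join_cons_cons]
      simp

lemma pv_fold_toList : ∀ (L : List String) (s : String),
    (L.foldl (fun a t => a ++ t ++ " ") s).toList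
      = (L.map String.toList).foldl (fun a t => a ++ t ++ [' ']) s.toList := by
  intro L
  induction L with
  | nil => intro s; rfl
  | cons t L ih =>
    intro s
    rw [List.foldl_cons, ih, List.map_cons, List.foldl_cons, String.toList_append,
      String.toList_append, show (" " : String).toList = [' '] from by decide]

-- A's token-by-token concatenation is B's join plus the trailing space (nonempty list)
lemma pv_fold_join_str (L : List String) (hL : L ≠ []) :
    L.foldl (fun a t => a ++ t ++ " ") "" = PySem.Str.join " " L ++ " " := by
  rw [← String.toList_inj, pv_fold_toList, String.toList_append, PySem.Str.toList_join]
  have hsp : (" " : String).toList = [' '] := by decide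
  have hem : ("" : String).toList = [] := by decide
  rw [hsp, hem]
  have := pv_fold_join_chars (L.map String.toList) [] (by simpa using hL)
  simpa using this


lemma pv_cb_le (toks : List String) (p : Nat) :
    (match ((List.range p).filter (fun i => toks.getD i "" == "<s>")).getLast? with
     | some b => b + 1 | none => 0) ≤ p := by
  cases hg : ((List.range p).filter (fun i => toks.getD i "" == "<s>")).getLast? with
  | none => simp
  | some b =>
    have hb := List.mem_of_getLast? hg
    rw [List.mem_filter] at hb
    have h2 := List.mem_range.mp hb.1
    show b + 1 ≤ p
    omega

lemma pv_ce_ge (toks : List String) (p n : Nat) (h : p ≤ n - 1) :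
    p ≤ (match ((List.range' (p + 1) (n - (p + 1))).filter (fun i => toks.getD i "" == "<s>")).head? with
         | some a => a - 1 | none => n - 1) := by
  cases hg : ((List.range' (p + 1) (n - (p + 1))).filter (fun i => toks.getD i "" == "<s>")).head? with
  | none => simpa using h
  | some a =>
    have ha := List.mem_of_head? hg
    rw [List.mem_filter] at ha
    have h2 := List.mem_range'_1.mp ha.1
    show p ≤ a - 1
    omega

lemma pv_final (toks : List String) (cb ce : Nat) (hcb : cb < toks.length) (hce : cb ≤ ce) :
    (PySem.List.slice toks (some (cb : Int)) (some ((ce : Int) + 1))).foldl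
        (fun acc token => acc ++ token ++ " ") ""
      = PySem.Str.join " " (PySem.List.slice toks (some (cb : Int)) (some ((ce : Int) + 1))) ++ " " := by
  apply pv_fold_join_str
  rw [show ((ce : Int) + 1) = ((ce + 1 : Nat) : Int) from by push_cast; ring, PySem.List.slice_natCast]
  apply List.ne_nil_of_length_pos
  rw [List.length_take, List.length_drop]
  omega

-- ===== VERDICT (by name: the statement is the Claim_ definition above) =====
theorem get_single_sentence_context_spec : Claim_equal_get_single_sentence_context := by
  unfold Claim_equal_get_single_sentence_context
  intro text euph _ hpre
  unfold Spec_get_single_sentence_context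
  unfold Pre_get_single_sentence_context at hpre
  simp only [get_single_sentence_context, get_single_sentence_context_alt, pvGetEuphPos]
  generalize hE : (if PySem.Str.isIn "-" euph then PySem.Str.replace euph "-" " - " else euph) = e at hpre ⊢
  generalize hT : PySem.Str.split₀ text = toks at hpre ⊢
  generalize hTE : PySem.Str.split₀ e = te at hpre ⊢
  by_cases hne : te = []
  · subst hne
    rcases hpre with h | h
    · exact absurd rfl h
    · have h1 : toks.length - 1 = 0 := by omega
      rw [h1]
      simp [pvGetEuphPosGo]
  · rw [pv_pos_eq toks te hne]
    cases hf : pvFindPos toks te (List.range (toks.length - 1)) with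
    | none => simp [List.length_eq_zero_iff.not.mpr hne]
    | some p1 =>
      obtain ⟨hmem, hslice⟩ := pv_pos_sound toks te _ p1 hf
      have hp1 : p1 < toks.length - 1 := List.mem_range.mp hmem
      have hbound := pv_bound_of_slice toks te p1 hne hslice
      have hk1 : 1 ≤ te.length := List.length_pos_of_ne_nil hne
      have hg : ((p1 : Int) == -1) = false := beq_eq_false_iff_ne.mpr (by omega)
      have hg2 : ((p1 : Int) + ((te.length : Int) - 1)).toNat = p1 + (te.length - 1) := by omega
      rw [if_neg (by simp [hg]), if_neg (by simp [hne])]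
      simp only [Int.toNat_natCast, hg2]
      rw [pv_begin_eq toks p1,
          pv_end_eq toks toks.length toks.length (p1 + (te.length - 1)) (by omega) (by omega),
          pv_before_eq toks p1 toks.length (by omega),
          pv_after_eq toks (p1 + (te.length - 1)) toks.length]
      apply pv_final
      · exact lt_of_le_of_lt (pv_cb_le toks p1) (by omega)
      · exact le_trans (le_trans (pv_cb_le toks p1)
          (by omega : p1 ≤ p1 + (te.length - 1)))
          (pv_ce_ge toks (p1 + (te.length - 1)) toks.length (by omega))
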